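-- pv_equiv track=rewrite | github.com/niek265/Bio-Informatica-Hanze | Thema 02 - Energiehuishouding van de cel/Praktijkopdracht/nonpov.py | triplet_maker
-- ===== SOURCE A (Python) =====
-- def triplet_maker(nucleo_string):
--     """Haalt uit een string van nucleotiden de tripletten en
--     slaat deze strings van tripletten op in een list.
--     Args: nucleo_string: een string van nucleotiden
--     Return: een list van strings van tripletten."""
--     count = 0
--     tripletten = []
--     triplet = ''
--     for nucleotide in nucleo_string:
--         if nucleotide != "\n":
--             triplet += nucleotide
--             count += 1
--             if count == 3:
--                 count = 0
--                 tripletten.append(triplet)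
--                 triplet = ''
--
--     return tripletten
-- ===== SOURCE B (Python) =====
-- def triplet_maker(nucleo_string):
--     """Haalt uit een string van nucleotiden de tripletten en
--     slaat deze strings van tripletten op in een list."""
--     s = "".join(c for c in nucleo_string if c != "\n")
--     return [s[i:i+3] for i in range(0, len(s) - len(s) % 3, 3)]
-- ===== Notes on version B (the rewrite author's own statement) =====
-- stated objective: simpler
-- what changed: Replaces the per-character count/accumulator state machine with a two-phase structure: first build the newline-free string with a join-filter, then slice it in strides of 3 over a length truncated to a multiple of 3.
import Mathlib
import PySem

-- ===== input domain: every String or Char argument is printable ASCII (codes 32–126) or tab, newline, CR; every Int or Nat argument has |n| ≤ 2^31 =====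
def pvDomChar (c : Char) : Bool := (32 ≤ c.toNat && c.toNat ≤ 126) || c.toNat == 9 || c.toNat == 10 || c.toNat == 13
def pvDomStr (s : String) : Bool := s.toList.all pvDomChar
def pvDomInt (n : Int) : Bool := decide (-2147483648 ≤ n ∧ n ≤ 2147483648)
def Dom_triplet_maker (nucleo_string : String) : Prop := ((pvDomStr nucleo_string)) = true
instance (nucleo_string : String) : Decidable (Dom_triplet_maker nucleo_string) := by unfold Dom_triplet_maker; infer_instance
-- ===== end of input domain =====

-- B replaces A's per-character count/accumulator state machine by a two-phase
-- filter-then-stride-slice decomposition (objective: simpler).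

-- ===== PORT A =====
-- the triplet accumulator is kept as List Char (Python str built char by char);
-- it is turned into a String exactly when appended to the result list
def triplet_maker (nucleo_string : String) : List String :=
  (nucleo_string.toList.foldl
    (fun (st : Int × List String × List Char) nucleotide =>
      if nucleotide ≠ '\n' then
        let triplet := st.2.2 ++ [nucleotide]
        let count := st.1 + 1
        if count = 3 then (0, st.2.1 ++ [String.ofList triplet], [])
        else (count, st.2.1, triplet)
      else st)
    (0, [], [])).2.1

-- ===== PORT B =====
def triplet_maker_alt (nucleo_string : String) : List String :=
  let s := nucleo_string.toList.filter (fun c => c ≠ '\n')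
  (PySem.List.pyRange 0 ((PySem.List.len s : Int) - PySem.Int.mod (PySem.List.len s) 3) 3).map
    (fun i => String.ofList (PySem.List.slice s (some i) (some (i + 3))))

-- ===== PRECONDITION & SPEC =====
def Spec_triplet_maker (nucleo_string : String) (out : List String) : Prop := out = triplet_maker_alt nucleo_string
instance (nucleo_string : String) (out : List String) : Decidable (Spec_triplet_maker nucleo_string out) := by unfold Spec_triplet_maker; infer_instance

-- ===== CLAIM (what is proved, stated in full; the proofs are below) =====
def Claim_equal_triplet_maker : Prop := ∀ (nucleo_string : String), Dom_triplet_maker nucleo_string → Spec_triplet_maker nucleo_string (triplet_maker nucleo_string)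

-- ===== LEMMAS AND PROOFS =====

-- the common characterisation: successive triplets of a (newline-free) char list
def pvChunks : List Char → List String
  | a :: b :: c :: t => String.ofList [a, b, c] :: pvChunks t
  | _ => []

-- A's loop step
def pvStepA : (Int × List String × List Char) → Char → (Int × List String × List Char) :=
  fun st nucleotide =>
    if nucleotide ≠ '\n' then
      let triplet := st.2.2 ++ [nucleotide]
      let count := st.1 + 1
      if count = 3 then (0, st.2.1 ++ [String.ofList triplet], [])
      else (count, st.2.1, triplet)
    else st

theorem pvStepA_newline (st : Int × List String × List Char) : pvStepA st '\n' = st := by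
  simp [pvStepA]

-- A's fold skips exactly the '\n' characters: folding over l equals folding over its filter
theorem foldA_filter (l : List Char) (st : Int × List String × List Char) :
    l.foldl pvStepA st = (l.filter (fun c => c ≠ '\n')).foldl pvStepA st := by
  induction l generalizing st with
  | nil => rfl
  | cons a t ih =>
      by_cases ha : a = '\n'
      · subst ha
        simp [List.foldl_cons, pvStepA_newline, ih]
      · simp [List.foldl_cons, ha, ih]

-- on a newline-free list, A's fold from a fresh triplet state produces the chunks
theorem foldA_chunks (n : Nat) : ∀ (l : List Char), l.length ≤ n → (∀ c ∈ l, c ≠ '\n') →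
    ∀ (acc : List String), (l.foldl pvStepA (0, acc, [])).2.1 = acc ++ pvChunks l := by
  induction n with
  | zero =>
      intro l hl _ acc
      have : l = [] := List.eq_nil_of_length_eq_zero (Nat.le_zero.mp hl)
      subst this; simp [pvChunks]
  | succ n ih =>
      intro l hl hnl acc
      match l with
      | [] => simp [pvChunks]
      | [a] =>
          have ha := hnl a (by simp)
          simp [List.foldl_cons, pvStepA, ha, pvChunks]
      | [a, b] =>
          have ha := hnl a (by simp)
          have hb := hnl b (by simp)
          simp [List.foldl_cons, pvStepA, ha, hb, pvChunks]
      | a :: b :: c :: t =>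
          have ha := hnl a (by simp)
          have hb := hnl b (by simp)
          have hc := hnl c (by simp)
          have ht : ∀ x ∈ t, x ≠ '\n' := fun x hx => hnl x (by simp [hx])
          have hlen : t.length ≤ n := by simp at hl; omega
          calc ((a :: b :: c :: t).foldl pvStepA (0, acc, [])).2.1
              = (t.foldl pvStepA (0, acc ++ [String.ofList [a, b, c]], [])).2.1 := by
                simp [List.foldl_cons, pvStepA, ha, hb, hc]
            _ = acc ++ pvChunks (a :: b :: c :: t) := by
                rw [ih t hlen ht]
                simp [pvChunks]

-- B's stride-3 slicing of s is exactly the chunk list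
theorem pvMod3_natCast (m : Nat) : PySem.Int.mod (m : Int) 3 = ((m % 3 : Nat) : Int) := by
  exact_mod_cast PySem.Int.mod_natCast m 3

theorem pvRange3_step (m : Int) (hm0 : 0 ≤ m) :
    PySem.List.pyRange 0 (m + 3) 3 = 0 :: (PySem.List.pyRange 0 m 3).map (· + 3) := by
  rw [PySem.List.pyRange_of_pos _ _ (by norm_num : (0:Int) < 3),
      PySem.List.pyRange_of_pos _ _ (by norm_num : (0:Int) < 3)]
  have hca : (if (0:Int) < m + 3 then ((m + 3 - 0 + 3 - 1) / 3).toNat else 0)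
      = (if (0:Int) < m then ((m - 0 + 3 - 1) / 3).toNat else 0) + 1 := by
    by_cases h0 : (0:Int) < m
    · simp only [if_pos (by omega : (0:Int) < m + 3), if_pos h0]
      have he : (m + 3 - 0 + 3 - 1) / 3 = (m - 0 + 3 - 1) / 3 + 1 := by
        have h5 : m + 3 - 0 + 3 - 1 = (m - 0 + 3 - 1) + 1 * 3 := by ring
        rw [h5, Int.add_mul_ediv_right _ _ (by norm_num : (3:Int) ≠ 0)]
      have hpos : 0 ≤ (m - 0 + 3 - 1) / 3 := Int.ediv_nonneg (by omega) (by norm_num)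
      rw [he, Int.toNat_add hpos (by norm_num)]
      simp
    · have hm0' : m = 0 := le_antisymm (not_lt.mp h0) hm0
      subst hm0'; decide
  rw [hca, List.range_succ_eq_map]
  simp only [List.map_cons, List.map_map]
  congr 1

theorem alt_body_chunks (n : Nat) : ∀ (s : List Char), s.length ≤ n →
    (PySem.List.pyRange 0 ((PySem.List.len s : Int) - PySem.Int.mod (PySem.List.len s) 3) 3).map
      (fun i => String.ofList (PySem.List.slice s (some i) (some (i + 3)))) = pvChunks s := by
  induction n with
  | zero =>
      intro s hs
      have : s = [] := List.eq_nil_of_length_eq_zero (Nat.le_zero.mp hs)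
      subst this; decide
  | succ n ih =>
      intro s hs
      match s with
      | [] => decide
      | [a] =>
          have h : (PySem.List.len ([a] : List Char) : Int) -
              PySem.Int.mod (PySem.List.len ([a] : List Char)) 3 = 0 := by
            simp only [PySem.List.len_eq, List.length_cons, List.length_nil]
            rw [show ((0:Nat) + 1 : Nat) = (1:Nat) from rfl, pvMod3_natCast]
            decide
          rw [h, show PySem.List.pyRange 0 0 3 = ([] : List Int) from by decide]
          simp [pvChunks]
      | [a, b] =>
          have h : (PySem.List.len ([a, b] : List Char) : Int) -
              PySem.Int.mod (PySem.List.len ([a, b] : List Char)) 3 = 0 := by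
            simp only [PySem.List.len_eq, List.length_cons, List.length_nil]
            rw [show ((0:Nat) + 1 + 1 : Nat) = (2:Nat) from rfl, pvMod3_natCast]
            decide
          rw [h, show PySem.List.pyRange 0 0 3 = ([] : List Int) from by decide]
          simp [pvChunks]
      | a :: b :: c :: t =>
          have hlen : t.length ≤ n := by simp at hs; omega
          have hm : (PySem.List.len (a :: b :: c :: t) : Int) -
              PySem.Int.mod (PySem.List.len (a :: b :: c :: t)) 3
              = ((PySem.List.len t : Int) - PySem.Int.mod (PySem.List.len t) 3) + 3 := by
            simp only [PySem.List.len_eq, List.length_cons, pvMod3_natCast]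
            have h4 : (t.length + 1 + 1 + 1) % 3 = t.length % 3 := by omega
            push_cast [h4]
            have : t.length % 3 ≤ t.length := Nat.mod_le _ _
            omega
          rw [hm]
          have hnn : (0:Int) ≤ (PySem.List.len t : Int) - PySem.Int.mod (PySem.List.len t) 3 := by
            simp only [PySem.List.len_eq, pvMod3_natCast]
            have : t.length % 3 ≤ t.length := Nat.mod_le _ _
            omega
          rw [pvRange3_step _ hnn]
          simp only [List.map_cons, List.map_map]
          rw [pvChunks]
          congr 1
          -- the head triplet agrees definitionally; the tail shifts each index by 3
          rw [← ih t hlen]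
          apply List.map_congr_left
          intro i hi
          have hi0 : 0 ≤ i :=
            ((PySem.List.mem_pyRange_iff_of_pos (by norm_num : (0:Int) < 3) i).mp hi).1
          simp only [Function.comp]
          congr 1
          obtain ⟨k, hk⟩ := Int.eq_ofNat_of_zero_le hi0
          subst hk
          have e3 : (k : Int) + 3 = (k : Int) + ((3 : Nat) : Int) := by norm_num
          rw [e3, PySem.List.slice_natCast_add t k 3]
          have e4 : (k : Int) + ((3 : Nat) : Int) = ((k + 3 : Nat) : Int) := by push_cast; ring
          have e5 : (k : Int) + ((3 : Nat) : Int) + 3 = ((k + 3 : Nat) : Int) + ((3 : Nat) : Int) := by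
            push_cast; ring
          rw [e5, e4, PySem.List.slice_natCast_add (a :: b :: c :: t) (k + 3) 3]
          simp [List.drop_succ_cons, show k + 3 = (k + 2) + 1 from rfl,
            show k + 2 = (k + 1) + 1 from rfl]

-- ===== VERDICT (by name: the statement is the Claim_ definition above) =====
theorem triplet_maker_spec : Claim_equal_triplet_maker := by
  intro ns _
  unfold Spec_triplet_maker triplet_maker triplet_maker_alt
  have hA : (ns.toList.foldl
      (fun (st : Int × List String × List Char) nucleotide =>
        if nucleotide ≠ '\n' then
          let triplet := st.2.2 ++ [nucleotide]
          let count := st.1 + 1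
          if count = 3 then (0, st.2.1 ++ [String.ofList triplet], [])
          else (count, st.2.1, triplet)
        else st)
      (0, [], [])) = ns.toList.foldl pvStepA (0, [], []) := rfl
  rw [hA, foldA_filter]
  set s := ns.toList.filter (fun c => c ≠ '\n') with hsdef
  have hnl : ∀ c ∈ s, c ≠ '\n' := by
    intro c hc
    have := List.of_mem_filter hc
    simpa using this
  rw [foldA_chunks s.length s le_rfl hnl []]
  rw [alt_body_chunks s.length s le_rfl]
  simp
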